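-- pv_equiv track=rewrite | github.com/xfcui/arxiv-lasso | src/config.py | get_journal_info
-- ===== SOURCE A (Python) =====
-- JOURNAL_MAP: dict[str, dict[str, str]] = {
--     "cell": {
--         "abbr": "cell",
--         "full_name": "Cell",
--         "path_name": "Cell",
--     },
--     "immunity": {
--         "abbr": "immunity",
--         "full_name": "Immunity",
--         "path_name": "Cell_Immunity",
--     },
--     "nature": {
--         "abbr": "nature",
--         "full_name": "Nature",
--         "path_name": "Nature",
--     },
--     "ni": {
--         "abbr": "ni",
--         "full_name": "Nature Immunology",
--         "path_name": "Nature_Immunology",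
--     },
--     "science": {
--         "abbr": "science",
--         "full_name": "Science",
--         "path_name": "Science",
--     },
--     "sciimmunol": {
--         "abbr": "sciimmunol",
--         "full_name": "Science Immunology",
--         "path_name": "Science_Immunology",
--     },
-- }
--
-- def get_journal_info(journal_name: str) -> dict[str, str] | None:
--     """Get journal info by any name/abbreviation.
--
--     Args:
--         journal_name: The name or abbreviation of the journal.
--
--     Returns:
--         A dictionary containing journal info or None if not found.
--     """
--     if not journal_name:
--         return None
--
--     name_lower = journal_name.lower()
--
--     # Direct match with key
--     if name_lower in JOURNAL_MAP:
--         return JOURNAL_MAP[name_lower]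
--
--     # Match with full name or path name
--     for info in JOURNAL_MAP.values():
--         if name_lower == info["full_name"].lower() or name_lower == info["path_name"].lower():
--             return info
--
--     return None
-- ===== SOURCE B (Python) =====
-- # A flat, hand-written lookup table: every accepted lowercased string mapped
-- # directly to its journal-info dict.  The per-call linear scan over
-- # JOURNAL_MAP.values() disappears entirely: one normalization, one dict lookup.
--
-- _CELL = {"abbr": "cell", "full_name": "Cell", "path_name": "Cell"}
-- _IMMUNITY = {"abbr": "immunity", "full_name": "Immunity", "path_name": "Cell_Immunity"}
-- _NATURE = {"abbr": "nature", "full_name": "Nature", "path_name": "Nature"}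
-- _NI = {"abbr": "ni", "full_name": "Nature Immunology", "path_name": "Nature_Immunology"}
-- _SCIENCE = {"abbr": "science", "full_name": "Science", "path_name": "Science"}
-- _SCIIMMUNOL = {"abbr": "sciimmunol", "full_name": "Science Immunology", "path_name": "Science_Immunology"}
--
-- INDEX: dict[str, dict[str, str]] = {
--     "cell": _CELL,
--     "immunity": _IMMUNITY,
--     "cell_immunity": _IMMUNITY,
--     "nature": _NATURE,
--     "ni": _NI,
--     "nature immunology": _NI,
--     "nature_immunology": _NI,
--     "science": _SCIENCE,
--     "sciimmunol": _SCIIMMUNOL,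
--     "science immunology": _SCIIMMUNOL,
--     "science_immunology": _SCIIMMUNOL,
-- }
--
-- def get_journal_info(journal_name: str) -> dict[str, str] | None:
--     """Get journal info by any name/abbreviation (single table lookup)."""
--     if not journal_name:
--         return None
--     return INDEX.get(journal_name.lower())
-- ===== Notes on version B (the rewrite author's own statement) =====
-- stated objective: idiomatic
-- what changed: B replaces A's direct-key check plus per-call linear scan over JOURNAL_MAP.values() (lowercasing each entry's full_name and path_name on every call) by a single flat lookup table INDEX that maps every accepted lowercased string directly to its info dict, so a call is one .lower() and one dict .get with no loop.
import Mathlib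
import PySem

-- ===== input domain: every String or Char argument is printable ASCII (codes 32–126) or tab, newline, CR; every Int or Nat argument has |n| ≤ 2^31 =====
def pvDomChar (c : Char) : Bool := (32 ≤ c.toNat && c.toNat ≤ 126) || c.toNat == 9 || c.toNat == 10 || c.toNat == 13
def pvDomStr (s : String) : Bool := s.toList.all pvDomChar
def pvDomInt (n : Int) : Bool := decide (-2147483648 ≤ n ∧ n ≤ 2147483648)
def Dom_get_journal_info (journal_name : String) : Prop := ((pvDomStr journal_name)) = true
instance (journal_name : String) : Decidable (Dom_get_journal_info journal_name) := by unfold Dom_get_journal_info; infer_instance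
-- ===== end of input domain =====

-- B replaces A's direct-key check plus per-call linear scan over JOURNAL_MAP by a single flat
-- hand-written lookup table mapping every accepted lowercased string to its info dict; objective: idiomatic.


-- ===== PORT A =====
-- module constant JOURNAL_MAP of Source A
def pvJMAP : PySem.Dict String (List (String × String)) :=
  PySem.Dict.ofList
    [("cell", [("abbr","cell"),("full_name","Cell"),("path_name","Cell")]),
     ("immunity", [("abbr","immunity"),("full_name","Immunity"),("path_name","Cell_Immunity")]),
     ("nature", [("abbr","nature"),("full_name","Nature"),("path_name","Nature")]),
     ("ni", [("abbr","ni"),("full_name","Nature Immunology"),("path_name","Nature_Immunology")]),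
     ("science", [("abbr","science"),("full_name","Science"),("path_name","Science")]),
     ("sciimmunol", [("abbr","sciimmunol"),("full_name","Science Immunology"),("path_name","Science_Immunology")])]

-- info[k]; exact here: every key accessed is present in every entry of the literal data
def pvItem (info : List (String × String)) (k : String) : String :=
  ((PySem.Dict.mk info).get? k).getD ""

-- A's 'for info in JOURNAL_MAP.values(): if name_lower == …: return info'
def pvScanA (vals : List (List (String × String))) (l : String) : Option (List (String × String)) :=
  match vals with
  | [] => none
  | info :: rest =>
    if l = PySem.Str.lower (pvItem info "full_name") ∨ l = PySem.Str.lower (pvItem info "path_name")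
    then some info else pvScanA rest l

def get_journal_info (journal_name : String) : Option (List (String × String)) :=
  if journal_name = "" then none
  else
    let name_lower := PySem.Str.lower journal_name
    if pvJMAP.contains name_lower then pvJMAP.get? name_lower
    else pvScanA pvJMAP.values name_lower

-- ===== PORT B =====
-- the shared info dicts of Source B
def pvCELL : List (String × String) := [("abbr","cell"),("full_name","Cell"),("path_name","Cell")]
def pvIMMUNITY : List (String × String) := [("abbr","immunity"),("full_name","Immunity"),("path_name","Cell_Immunity")]
def pvNATURE : List (String × String) := [("abbr","nature"),("full_name","Nature"),("path_name","Nature")]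
def pvNI : List (String × String) := [("abbr","ni"),("full_name","Nature Immunology"),("path_name","Nature_Immunology")]
def pvSCIENCE : List (String × String) := [("abbr","science"),("full_name","Science"),("path_name","Science")]
def pvSCIIMMUNOL : List (String × String) := [("abbr","sciimmunol"),("full_name","Science Immunology"),("path_name","Science_Immunology")]

-- Source B's literal flat table INDEX
def pvINDEX : PySem.Dict String (List (String × String)) :=
  PySem.Dict.ofList
    [("cell", pvCELL),
     ("immunity", pvIMMUNITY),
     ("cell_immunity", pvIMMUNITY),
     ("nature", pvNATURE),
     ("ni", pvNI),
     ("nature immunology", pvNI),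
     ("nature_immunology", pvNI),
     ("science", pvSCIENCE),
     ("sciimmunol", pvSCIIMMUNOL),
     ("science immunology", pvSCIIMMUNOL),
     ("science_immunology", pvSCIIMMUNOL)]

def get_journal_info_alt (journal_name : String) : Option (List (String × String)) :=
  if journal_name = "" then none
  else pvINDEX.get? (PySem.Str.lower journal_name)

-- ===== PRECONDITION & SPEC =====
def Spec_get_journal_info (journal_name : String) (out : Option (List (String × String))) : Prop := out = get_journal_info_alt journal_name
instance (journal_name : String) (out : Option (List (String × String))) : Decidable (Spec_get_journal_info journal_name out) := by unfold Spec_get_journal_info; infer_instance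

-- ===== CLAIM (what is proved, stated in full; the proofs are below) =====
def Claim_equal_get_journal_info : Prop := ∀ (journal_name : String), Dom_get_journal_info journal_name → Spec_get_journal_info journal_name (get_journal_info journal_name)

-- ===== LEMMAS AND PROOFS =====
theorem pvJMAP_eq : pvJMAP = PySem.Dict.mk
  [("cell", [("abbr","cell"),("full_name","Cell"),("path_name","Cell")]),
   ("immunity", [("abbr","immunity"),("full_name","Immunity"),("path_name","Cell_Immunity")]),
   ("nature", [("abbr","nature"),("full_name","Nature"),("path_name","Nature")]),
   ("ni", [("abbr","ni"),("full_name","Nature Immunology"),("path_name","Nature_Immunology")]),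
   ("science", [("abbr","science"),("full_name","Science"),("path_name","Science")]),
   ("sciimmunol", [("abbr","sciimmunol"),("full_name","Science Immunology"),("path_name","Science_Immunology")])]
  := by decide

theorem pvINDEX_eq : pvINDEX = PySem.Dict.mk
  [("cell", [("abbr","cell"),("full_name","Cell"),("path_name","Cell")]),
   ("immunity", [("abbr","immunity"),("full_name","Immunity"),("path_name","Cell_Immunity")]),
   ("cell_immunity", [("abbr","immunity"),("full_name","Immunity"),("path_name","Cell_Immunity")]),
   ("nature", [("abbr","nature"),("full_name","Nature"),("path_name","Nature")]),
   ("ni", [("abbr","ni"),("full_name","Nature Immunology"),("path_name","Nature_Immunology")]),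
   ("nature immunology", [("abbr","ni"),("full_name","Nature Immunology"),("path_name","Nature_Immunology")]),
   ("nature_immunology", [("abbr","ni"),("full_name","Nature Immunology"),("path_name","Nature_Immunology")]),
   ("science", [("abbr","science"),("full_name","Science"),("path_name","Science")]),
   ("sciimmunol", [("abbr","sciimmunol"),("full_name","Science Immunology"),("path_name","Science_Immunology")]),
   ("science immunology", [("abbr","sciimmunol"),("full_name","Science Immunology"),("path_name","Science_Immunology")]),
   ("science_immunology", [("abbr","sciimmunol"),("full_name","Science Immunology"),("path_name","Science_Immunology")])]
  := by decide

theorem pv_core_ne (l : String)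
 (h1 : l ≠ "cell") (h2 : l ≠ "immunity") (h3 : l ≠ "cell_immunity") (h4 : l ≠ "nature")
 (h5 : l ≠ "ni") (h6 : l ≠ "nature immunology") (h7 : l ≠ "nature_immunology") (h8 : l ≠ "science")
 (h9 : l ≠ "sciimmunol") (h10 : l ≠ "science immunology") (h11 : l ≠ "science_immunology") :
    (if pvJMAP.contains l then pvJMAP.get? l else pvScanA pvJMAP.values l) = pvINDEX.get? l := by
  have e1 : PySem.Str.lower "Cell" = "cell" := by decide
  have e2 : PySem.Str.lower "Immunity" = "immunity" := by decide
  have e3 : PySem.Str.lower "Cell_Immunity" = "cell_immunity" := by decide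
  have e4 : PySem.Str.lower "Nature" = "nature" := by decide
  have e5 : PySem.Str.lower "Nature Immunology" = "nature immunology" := by decide
  have e6 : PySem.Str.lower "Nature_Immunology" = "nature_immunology" := by decide
  have e7 : PySem.Str.lower "Science" = "science" := by decide
  have e8 : PySem.Str.lower "Science Immunology" = "science immunology" := by decide
  have e9 : PySem.Str.lower "Science_Immunology" = "science_immunology" := by decide
  rw [pvJMAP_eq, pvINDEX_eq]
  have hnil : (PySem.Dict.mk ([] : List (String × List (String × String)))).get? l = none := rfl
  simp [pvScanA, pvItem, PySem.Dict.get?_mk_cons, PySem.Dict.contains, hnil,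
        e1, e2, e3, e4, e5, e6, e7, e8, e9,
        h1, h2, h3, h4, h6, h7, h8, h10, h11,
        Ne.symm h1, Ne.symm h2, Ne.symm h3, Ne.symm h4, Ne.symm h5, Ne.symm h6,
        Ne.symm h7, Ne.symm h8, Ne.symm h9, Ne.symm h10, Ne.symm h11]

theorem pv_core (l : String) :
    (if pvJMAP.contains l then pvJMAP.get? l else pvScanA pvJMAP.values l) = pvINDEX.get? l := by
  by_cases h1 : l = "cell"; · subst h1; decide
  by_cases h2 : l = "immunity"; · subst h2; decide
  by_cases h3 : l = "cell_immunity"; · subst h3; decide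
  by_cases h4 : l = "nature"; · subst h4; decide
  by_cases h5 : l = "ni"; · subst h5; decide
  by_cases h6 : l = "nature immunology"; · subst h6; decide
  by_cases h7 : l = "nature_immunology"; · subst h7; decide
  by_cases h8 : l = "science"; · subst h8; decide
  by_cases h9 : l = "sciimmunol"; · subst h9; decide
  by_cases h10 : l = "science immunology"; · subst h10; decide
  by_cases h11 : l = "science_immunology"; · subst h11; decide
  exact pv_core_ne l h1 h2 h3 h4 h5 h6 h7 h8 h9 h10 h11

-- ===== VERDICT (by name: the statement is the Claim_ definition above) =====
theorem get_journal_info_spec : Claim_equal_get_journal_info := by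
  intro s _
  unfold Spec_get_journal_info get_journal_info get_journal_info_alt
  by_cases hs : s = ""
  · simp [hs]
  · simp only [hs, if_false]
    exact pv_core (PySem.Str.lower s)
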